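-- pv_equiv track=rewrite | github.com/Best-MDP-Group/mdp_algo | utils.py | angleCorrection
-- ===== SOURCE A (Python) =====
-- def angleCorrection(commands):
--     output = []
--     count = 0
--
--     for command in commands:
--         # if the command is of type TurnCommand, and the type_of_turn is SMALL, then we need to split it into 4 commands
--         if command[0:2] == 'RF' or command[0:2] == 'LF':
--             count += 1
--
--         output.append(command)
--
--         if count == 4:
--             output.append("LF005")
--             output.append("SB003")
--             count = 0
--
--     return ','.join(output)
-- ===== SOURCE B (Python) =====
-- def angleCorrection(commands):
--     turn_positions = [i for i, c in enumerate(commands) if c[0:2] in ('RF', 'LF')]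
--     triggers = {p for k, p in enumerate(turn_positions) if k % 4 == 3}
--     output = []
--     for i, c in enumerate(commands):
--         output.append(c)
--         if i in triggers:
--             output.append("LF005")
--             output.append("SB003")
--     return ','.join(output)
-- ===== Notes on version B (the rewrite author's own statement) =====
-- stated objective: alternative
-- what changed: Replaced the single-pass running counter/reset with a two-pass scheme: first collect indices of turn commands and take every 4th one as a precomputed trigger set, then emit commands and insert the correction pair at trigger indices.
import Mathlib
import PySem

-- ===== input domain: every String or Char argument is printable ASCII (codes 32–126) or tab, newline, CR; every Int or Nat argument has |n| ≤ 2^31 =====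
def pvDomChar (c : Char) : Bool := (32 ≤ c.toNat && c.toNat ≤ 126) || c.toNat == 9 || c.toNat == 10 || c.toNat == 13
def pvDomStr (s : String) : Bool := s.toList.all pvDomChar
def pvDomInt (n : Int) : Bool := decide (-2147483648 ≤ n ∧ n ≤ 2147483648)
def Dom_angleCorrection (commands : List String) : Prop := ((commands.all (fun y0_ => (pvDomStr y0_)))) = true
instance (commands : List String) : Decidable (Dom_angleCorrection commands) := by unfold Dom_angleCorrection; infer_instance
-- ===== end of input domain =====

-- B replaces A's running counter/reset with two passes: collect turn-command indices,
-- keep every 4th as a trigger set, then emit with corrections at trigger indices (alternative decomposition, same cost).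

-- shared turn test: command[0:2] == 'RF' or command[0:2] == 'LF' (both Pythons compute exactly this)
def pvIsTurn (c : String) : Bool :=
  PySem.Str.slice c (some 0) (some 2) == "RF" || PySem.Str.slice c (some 0) (some 2) == "LF"

-- ===== PORT A =====
-- A's loop body
def pvStepA (st : List String × Int) (command : String) : List String × Int :=
  let count := if pvIsTurn command then st.2 + 1 else st.2
  let output := st.1 ++ [command]
  if count = 4 then (output ++ ["LF005", "SB003"], 0) else (output, count)

def angleCorrection (commands : List String) : String :=
  let res := commands.foldl pvStepA ([], 0)
  PySem.Str.join "," res.1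

-- ===== PORT B =====
-- B's second-pass loop body
def pvStepB (triggers : PySem.Set Int) (out : List String) (p : Int × String) : List String :=
  let out := out ++ [p.2]
  if PySem.Set.contains triggers p.1 then out ++ ["LF005", "SB003"] else out

def angleCorrection_alt (commands : List String) : String :=
  let turnPositions := ((PySem.List.enumerate commands).filter (fun p => pvIsTurn p.2)).map Prod.fst
  let triggers : PySem.Set Int :=
    PySem.Set.ofList (((PySem.List.enumerate turnPositions).filter (fun p => PySem.Int.mod p.1 4 == 3)).map Prod.snd)
  let output := (PySem.List.enumerate commands).foldl (pvStepB triggers) []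
  PySem.Str.join "," output

-- ===== PRECONDITION & SPEC =====
def Spec_angleCorrection (commands : List String) (out : String) : Prop := out = angleCorrection_alt commands
instance (commands : List String) (out : String) : Decidable (Spec_angleCorrection commands out) := by unfold Spec_angleCorrection; infer_instance

-- ===== CLAIM (what is proved, stated in full; the proofs are below) =====
def Claim_equal_angleCorrection : Prop := ∀ (commands : List String), Dom_angleCorrection commands → Spec_angleCorrection commands (angleCorrection commands)

-- ===== LEMMAS AND PROOFS =====

-- the emitted list of A's loop, as a structural recursion
def pvSpec (cs : List String) (c : Int) : List String :=
  match cs with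
  | [] => []
  | x :: xs =>
    let c' := if pvIsTurn x then c + 1 else c
    if c' = 4 then x :: "LF005" :: "SB003" :: pvSpec xs 0
    else x :: pvSpec xs c'

-- final counter value of A's loop
def pvCnt (cs : List String) (c : Int) : Int :=
  match cs with
  | [] => c
  | x :: xs =>
    let c' := if pvIsTurn x then c + 1 else c
    if c' = 4 then pvCnt xs 0 else pvCnt xs c'

-- indices of turn commands in cs, starting at index i (B's first pass)
def pvTurnPos (cs : List String) (i : Int) : List Int :=
  match cs with
  | [] => []
  | x :: xs => (if pvIsTurn x then [i] else []) ++ pvTurnPos xs (i + 1)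

-- every 4th element of ps, counting from offset k (B's trigger selection)
def pvSel (ps : List Int) (k : Int) : List Int :=
  match ps with
  | [] => []
  | p :: rest => (if PySem.Int.mod k 4 = 3 then [p] else []) ++ pvSel rest (k + 1)

-- B's second pass, as a structural recursion
def pvLoop (T : PySem.Set Int) (cs : List String) (i : Int) : List String :=
  match cs with
  | [] => []
  | x :: xs => x :: (if PySem.Set.contains T i then ["LF005", "SB003"] else []) ++ pvLoop T xs (i + 1)

lemma pvA_foldl (cs : List String) : ∀ (out : List String) (c : Int),
    cs.foldl pvStepA (out, c) = (out ++ pvSpec cs c, pvCnt cs c) := by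
  induction cs with
  | nil => intro out c; simp [pvSpec, pvCnt]
  | cons x xs ih =>
    intro out c
    rw [List.foldl_cons]
    by_cases ht : pvIsTurn x
    · by_cases h4 : c + 1 = 4
      · rw [show pvStepA (out, c) x = (out ++ [x, "LF005", "SB003"], 0) by
          simp [pvStepA, ht, h4], ih]
        simp [pvSpec, pvCnt, ht, h4]
      · rw [show pvStepA (out, c) x = (out ++ [x], c + 1) by
          simp [pvStepA, ht, h4], ih]
        simp [pvSpec, pvCnt, ht, h4]
    · by_cases h4 : c = 4
      · rw [show pvStepA (out, c) x = (out ++ [x, "LF005", "SB003"], 0) by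
          simp [pvStepA, ht, h4], ih]
        simp [pvSpec, pvCnt, ht, h4]
      · rw [show pvStepA (out, c) x = (out ++ [x], c) by
          simp [pvStepA, ht, h4], ih]
        simp [pvSpec, pvCnt, ht, h4]

lemma pvTurnPos_bridge (cs : List String) : ∀ (i : Int),
    (((PySem.List.enumerate cs i).filter (fun p => pvIsTurn p.2)).map Prod.fst) = pvTurnPos cs i := by
  induction cs with
  | nil => intro i; simp [PySem.List.enumerate, pvTurnPos]
  | cons x xs ih =>
    intro i
    rw [PySem.List.enumerate_cons]
    by_cases ht : pvIsTurn x <;> simp [ht, pvTurnPos, ih]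

lemma pvSel_bridge (ps : List Int) : ∀ (k : Int),
    (((PySem.List.enumerate ps k).filter (fun p => PySem.Int.mod p.1 4 == 3)).map Prod.snd) = pvSel ps k := by
  induction ps with
  | nil => intro k; simp [PySem.List.enumerate, pvSel]
  | cons p rest ih =>
    intro k
    rw [PySem.List.enumerate_cons]
    by_cases hm : PySem.Int.mod k 4 = 3
    · have hm' : (k % 4 : Int) = 3 := by
        rw [← PySem.Int.mod_eq_emod_of_pos (by omega : (0:Int) < 4)]; exact hm
      simp only [pvSel]
      rw [if_pos hm, ← ih (k + 1)]
      simp [hm']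
    · have hm' : ¬ (k % 4 : Int) = 3 := by
        rw [← PySem.Int.mod_eq_emod_of_pos (by omega : (0:Int) < 4)]; exact hm
      simp only [pvSel]
      rw [if_neg hm, ← ih (k + 1)]
      simp [hm']

lemma pvLoop_bridge (T : PySem.Set Int) (cs : List String) : ∀ (i : Int) (acc : List String),
    (PySem.List.enumerate cs i).foldl (pvStepB T) acc = acc ++ pvLoop T cs i := by
  induction cs with
  | nil => intro i acc; simp [PySem.List.enumerate, pvLoop]
  | cons x xs ih =>
    intro i acc
    rw [PySem.List.enumerate_cons, List.foldl_cons]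
    by_cases hc : PySem.Set.contains T i
    · have hmem : i ∈ T := by
        simpa [PySem.Set.contains, List.contains_iff_mem] using hc
      rw [show pvStepB T acc (i, x) = acc ++ [x, "LF005", "SB003"] by
        simp [pvStepB, hmem], ih]
      simp [pvLoop, hmem]
    · have hmem : i ∉ T := by
        simpa [PySem.Set.contains, List.contains_iff_mem] using hc
      rw [show pvStepB T acc (i, x) = acc ++ [x] by
        simp [pvStepB, hmem], ih]
      simp [pvLoop, hmem]

lemma pvSel_congr (ps : List Int) : ∀ (k k' : Int),
    PySem.Int.mod k 4 = PySem.Int.mod k' 4 → pvSel ps k = pvSel ps k' := by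
  induction ps with
  | nil => intro k k' _; rfl
  | cons p rest ih =>
    intro k k' h
    have h4 : (0 : Int) < 4 := by omega
    rw [PySem.Int.mod_eq_emod_of_pos h4, PySem.Int.mod_eq_emod_of_pos h4] at h
    have h1 : PySem.Int.mod (k + 1) 4 = PySem.Int.mod (k' + 1) 4 := by
      rw [PySem.Int.mod_eq_emod_of_pos h4, PySem.Int.mod_eq_emod_of_pos h4]; omega
    have h0 : PySem.Int.mod k 4 = PySem.Int.mod k' 4 := by
      rw [PySem.Int.mod_eq_emod_of_pos h4, PySem.Int.mod_eq_emod_of_pos h4]; omega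
    simp only [pvSel, h0, ih _ _ h1]

lemma pvTurnPos_ge (cs : List String) : ∀ (i p : Int), p ∈ pvTurnPos cs i → i ≤ p := by
  induction cs with
  | nil => intro i p h; simp [pvTurnPos] at h
  | cons x xs ih =>
    intro i p h
    simp only [pvTurnPos, List.mem_append] at h
    rcases h with h | h
    · split_ifs at h <;> simp_all
    · have := ih (i + 1) p h; omega

lemma pvSel_sub (ps : List Int) : ∀ (k p : Int), p ∈ pvSel ps k → p ∈ ps := by
  induction ps with
  | nil => intro k p h; simp [pvSel] at h
  | cons q rest ih =>
    intro k p h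
    simp only [pvSel, List.mem_append] at h
    rcases h with h | h
    · split_ifs at h <;> simp_all
    · exact List.mem_cons_of_mem _ (ih _ _ h)

lemma pvLoop_eq_spec (cs : List String) : ∀ (T : PySem.Set Int) (i c : Int),
    0 ≤ c → c < 4 →
    (∀ j, i ≤ j → (PySem.Set.contains T j = true ↔ j ∈ pvSel (pvTurnPos cs i) c)) →
    pvLoop T cs i = pvSpec cs c := by
  induction cs with
  | nil => intro T i c _ _ _; rfl
  | cons x xs ih =>
    intro T i c hc0 hc4 hmem
    have hmod : PySem.Int.mod c 4 = c := by
      rw [PySem.Int.mod_eq_emod_of_pos (by omega)]; omega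
    have hnotself : ∀ (k : Int), i ∉ pvSel (pvTurnPos xs (i + 1)) k := by
      intro k hi
      have := pvTurnPos_ge xs (i + 1) i (pvSel_sub _ _ _ hi)
      omega
    by_cases ht : pvIsTurn x
    · by_cases h3 : c = 3
      · -- trigger fires here
        have hsel : pvSel (pvTurnPos (x :: xs) i) c = i :: pvSel (pvTurnPos xs (i + 1)) 0 := by
          simp only [pvTurnPos]
          rw [if_pos ht]
          simp only [List.singleton_append, pvSel]
          rw [if_pos (by rw [hmod]; exact h3),
            pvSel_congr (pvTurnPos xs (i + 1)) (c + 1) 0 (by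
              have h4 : (0 : Int) < 4 := by omega
              rw [PySem.Int.mod_eq_emod_of_pos h4, PySem.Int.mod_eq_emod_of_pos h4]
              omega)]
          simp
        have hci : PySem.Set.contains T i = true := by
          rw [hmem i le_rfl, hsel]; simp
        have hrec : pvLoop T xs (i + 1) = pvSpec xs 0 := by
          refine ih T (i + 1) 0 (by omega) (by omega) ?_
          intro j hj
          rw [hmem j (by omega), hsel]
          simp only [List.mem_cons]
          constructor
          · rintro (rfl | h)
            · omega
            · exact h
          · exact Or.inr
        simp only [pvLoop, pvSpec]
        rw [if_pos hci, if_pos ht, if_pos (by omega : (c + 1 : Int) = 4), hrec]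
        simp
      · -- a turn, no trigger here
        have hsel : pvSel (pvTurnPos (x :: xs) i) c = pvSel (pvTurnPos xs (i + 1)) (c + 1) := by
          simp only [pvTurnPos]
          rw [if_pos ht]
          simp only [List.singleton_append, pvSel]
          rw [if_neg (by rw [hmod]; exact h3)]
          simp
        have hci : PySem.Set.contains T i = false := by
          rw [Bool.eq_false_iff]
          intro hcon
          exact hnotself (c + 1) (by rw [← hsel, ← hmem i le_rfl]; exact hcon)
        have hrec : pvLoop T xs (i + 1) = pvSpec xs (c + 1) := by
          refine ih T (i + 1) (c + 1) (by omega) (by omega) ?_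
          intro j hj
          rw [hmem j (by omega), hsel]
        simp only [pvLoop, pvSpec]
        rw [if_neg (by rw [hci]; simp), if_pos ht, if_neg (by omega : ¬ (c + 1 : Int) = 4), hrec]
        simp
    · -- not a turn command
      have hsel : pvSel (pvTurnPos (x :: xs) i) c = pvSel (pvTurnPos xs (i + 1)) c := by
        simp only [pvTurnPos]
        rw [if_neg ht]
        simp
      have hci : PySem.Set.contains T i = false := by
        rw [Bool.eq_false_iff]
        intro hcon
        exact hnotself c (by rw [← hsel, ← hmem i le_rfl]; exact hcon)
      have hrec : pvLoop T xs (i + 1) = pvSpec xs c := by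
        refine ih T (i + 1) c hc0 hc4 ?_
        intro j hj
        rw [hmem j (by omega), hsel]
      simp only [pvLoop, pvSpec]
      rw [if_neg (by rw [hci]; simp), if_neg ht, if_neg (by omega : ¬ (c : Int) = 4), hrec]
      simp

lemma pvContains_ofList (l : List Int) (j : Int) :
    PySem.Set.contains (PySem.Set.ofList l) j = true ↔ j ∈ l := by
  simp only [PySem.Set.contains, List.contains_iff_mem]
  exact PySem.Set.mem_ofList l j

-- ===== VERDICT (by name: the statement is the Claim_ definition above) =====
theorem angleCorrection_spec : Claim_equal_angleCorrection := by
  unfold Claim_equal_angleCorrection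
  intro commands _
  unfold Spec_angleCorrection angleCorrection angleCorrection_alt
  rw [pvA_foldl commands [] 0]
  simp only [List.nil_append]
  rw [pvTurnPos_bridge commands 0, pvSel_bridge (pvTurnPos commands 0) 0,
    pvLoop_bridge _ commands 0 []]
  simp only [List.nil_append]
  congr 1
  exact (pvLoop_eq_spec commands _ 0 0 (by omega) (by omega)
    (fun j _ => pvContains_ofList _ j)).symm
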